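-- pv_equiv track=rewrite | github.com/balajichedurupalli-spec/Python-Challenges- | main.py | f
-- ===== SOURCE A (Python) =====
-- from math import sqrt
--
-- def is_prime(x):
--     if x < 2:
--         return False
--     for i in range(2, int(sqrt(x)) + 1):
--         if x % i != 0:
--             continue
--         else:
--             return False
--     return True
--
-- def f(nums):
--     arr = []
--     for num in nums:
--         if num % 2 != 0 and is_prime(num):
--             continue
--         else:
--             arr.append(num*2)
--     arr.sort()
--     return arr[-3:]
-- ===== SOURCE B (Python) =====
-- from math import sqrt
--
-- def is_prime(x):
--     if x < 2:
--         return False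
--     for i in range(2, int(sqrt(x)) + 1):
--         if x % i != 0:
--             continue
--         else:
--             return False
--     return True
--
-- def f(nums):
--     # Single pass keeping only the 3 largest doubled values in a sorted buffer
--     top = []
--     for num in nums:
--         if num % 2 != 0 and is_prime(num):
--             continue
--         d = num * 2
--         i = 0
--         while i < len(top) and top[i] <= d:
--             i += 1
--         top.insert(i, d)
--         if len(top) > 3:
--             top.pop(0)
--     return top
-- ===== Notes on version B (the rewrite author's own statement) =====
-- stated objective: alternative
-- what changed: B replaces A's build-full-list-then-global-sort-then-slice with a single pass that maintains a sorted buffer of at most the 3 largest doubled values (insert in order, evict the smallest), so no full intermediate list and no global sort.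
import Mathlib
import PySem

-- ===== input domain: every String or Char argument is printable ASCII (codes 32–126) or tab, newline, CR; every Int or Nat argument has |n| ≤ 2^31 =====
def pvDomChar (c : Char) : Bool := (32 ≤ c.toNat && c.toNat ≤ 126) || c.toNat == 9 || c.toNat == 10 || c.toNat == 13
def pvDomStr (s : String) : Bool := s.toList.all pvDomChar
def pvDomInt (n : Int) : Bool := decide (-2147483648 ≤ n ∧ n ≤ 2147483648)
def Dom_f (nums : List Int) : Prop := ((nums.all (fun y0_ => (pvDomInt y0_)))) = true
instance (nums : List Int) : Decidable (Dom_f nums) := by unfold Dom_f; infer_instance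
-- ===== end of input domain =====

-- B keeps only a sorted buffer of the 3 largest doubled values in one pass instead of sorting the whole doubled list; alternative algorithm, same results.


-- ===== PORT A =====
-- shared helper of both Pythons (A and B use the identical is_prime)
-- trial-division loop: 'if x % i != 0: continue else: return False'
def trialLoop (x : Int) : List Int → Bool
  | [] => true
  | i :: is => if PySem.Int.mod x i ≠ 0 then trialLoop x is else false

-- int(sqrt(x)) ported as Nat.sqrt: exact for the 2 ≤ x ≤ 2^31 of Dom_f (float sqrt is correctly rounded there)
def is_prime (x : Int) : Bool :=
  if x < 2 then false
  else trialLoop x (PySem.List.pyRange 2 ((Nat.sqrt x.toNat : Int) + 1) 1)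

def f (nums : List Int) : List Int :=
  let arr := nums.foldl
    (fun arr num =>
      if PySem.Int.mod num 2 ≠ 0 && is_prime num then arr
      else arr ++ [num * 2]) []
  let arr := PySem.List.sorted arr (fun x => x) false
  PySem.List.slice arr (some (-3)) none

-- ===== PORT B =====
-- the while-loop + insert of Source B: walk past elements ≤ d, put d there
def insSorted (d : Int) : List Int → List Int
  | [] => [d]
  | y :: ys => if y ≤ d then y :: insSorted d ys else d :: y :: ys

def f_alt (nums : List Int) : List Int :=
  nums.foldl
    (fun top num =>
      if PySem.Int.mod num 2 ≠ 0 && is_prime num then top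
      else
        let t := insSorted (num * 2) top
        if t.length > 3 then t.drop 1 else t)  -- top.pop(0)
    []

-- ===== PRECONDITION & SPEC =====
def Spec_f (nums : List Int) (out : List Int) : Prop := out = f_alt nums
instance (nums : List Int) (out : List Int) : Decidable (Spec_f nums out) := by unfold Spec_f; infer_instance

-- ===== CLAIM (what is proved, stated in full; the proofs are below) =====
def Claim_equal_f : Prop := ∀ (nums : List Int), Dom_f nums → Spec_f nums (f nums)

-- ===== LEMMAS AND PROOFS =====

-- last-3 of a list
def trim3 (l : List Int) : List Int := l.drop (l.length - 3)

theorem trim3_of_le (l : List Int) (h : l.length ≤ 3) : trim3 l = l := by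
  simp [trim3, Nat.sub_eq_zero_of_le h]

theorem trim3_cons (a : Int) (u : List Int) (h : 3 ≤ u.length) :
    trim3 (a :: u) = trim3 u := by
  unfold trim3
  have h1 : (a :: u).length - 3 = (u.length - 3) + 1 := by simp; omega
  rw [h1, List.drop_succ_cons]

theorem length_insSorted (d : Int) (l : List Int) :
    (insSorted d l).length = l.length + 1 := by
  induction l with
  | nil => simp [insSorted]
  | cons y ys ih => simp only [insSorted]; split <;> simp [ih]

theorem length_trim3_le (l : List Int) : (trim3 l).length ≤ 3 := by
  simp [trim3]; omega

theorem perm_insSorted (d : Int) (l : List Int) : (insSorted d l).Perm (l ++ [d]) := by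
  induction l with
  | nil => simp [insSorted]
  | cons y ys ih =>
    simp only [insSorted]
    split
    · exact (ih.cons y).trans (by simp)
    · simpa using (List.perm_append_singleton d (y :: ys)).symm

theorem pairwise_insSorted (d : Int) (l : List Int) (h : l.Pairwise (· ≤ ·)) :
    (insSorted d l).Pairwise (· ≤ ·) := by
  induction l with
  | nil => simp [insSorted]
  | cons y ys ih =>
    simp only [insSorted]
    rcases List.pairwise_cons.mp h with ⟨hy, hys⟩
    split
    · rename_i hyd
      refine List.pairwise_cons.mpr ⟨?_, ih hys⟩
      intro z hz
      have := (perm_insSorted d ys).mem_iff.mp hz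
      rcases List.mem_append.mp this with hz' | hz'
      · exact hy z hz'
      · simp at hz'; omega
    · rename_i hyd
      refine List.pairwise_cons.mpr ⟨?_, h⟩
      intro z hz
      simp at hz
      rcases hz with rfl | hz
      · omega
      · exact le_trans (by omega) (hy z hz)

-- sorted (l ++ [x]) = insSorted x (sorted l): both sorted perms of the same multiset of Ints
theorem sorted_append_singleton (l : List Int) (x : Int) :
    PySem.List.sorted (l ++ [x]) (fun y => y) false
      = insSorted x (PySem.List.sorted l (fun y => y) false) := by
  refine List.Perm.eq_of_pairwise (fun a b _ _ h1 h2 => le_antisymm h1 h2)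
    (PySem.List.sorted_pairwise _ _)
    (pairwise_insSorted x _ (PySem.List.sorted_pairwise _ _)) ?_
  refine (PySem.List.sorted_perm _ _ _).trans ?_
  refine List.Perm.trans ?_ (perm_insSorted x _).symm
  exact ((PySem.List.sorted_perm l (fun y => y) false).symm).append_right [x]

-- the key bounded-buffer lemma: the last 3 after inserting depend only on the last 3
theorem trim3_insSorted (x : Int) (s : List Int) (hs : s.Pairwise (· ≤ ·)) :
    trim3 (insSorted x s) = trim3 (insSorted x (trim3 s)) := by
  induction s with
  | nil => simp [trim3, insSorted]
  | cons y ys ih =>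
    by_cases hlen : (y :: ys).length ≤ 3
    · rw [trim3_of_le _ hlen]
    · have hys3 : 3 ≤ ys.length := by simp at hlen ⊢; omega
      rcases List.pairwise_cons.mp hs with ⟨hy, hys⟩
      rw [trim3_cons y ys hys3]
      rw [← ih hys]
      -- suffices: trim3 (insSorted x (y :: ys)) = trim3 (insSorted x ys)
      simp only [insSorted]
      split
      · -- y ≤ x : insSorted = y :: insSorted x ys
        exact trim3_cons y _ (by rw [length_insSorted]; omega)
      · -- x < y : insSorted x ys = x :: ys since all of ys ≥ y > x
        rename_i hxy
        have hins : insSorted x ys = x :: ys := by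
          cases ys with
          | nil => simp at hys3
          | cons z zs =>
            have hz : y ≤ z := hy z (by simp)
            simp only [insSorted]
            rw [if_neg (by omega)]
        rw [hins, trim3_cons x (y :: ys) (by simp; omega),
            trim3_cons x ys hys3, trim3_cons y ys hys3]

-- shorthand for the two step functions
theorem trim3_eq_step (t : List Int) (h : t.length ≤ 4) :
    (if t.length > 3 then t.drop 1 else t) = trim3 t := by
  split
  · rename_i h3
    have : t.length - 3 = 1 := by omega
    simp [trim3, this]
  · rename_i h3
    rw [trim3_of_le t (by omega)]

-- main invariant: B's fold state over l equals the last 3 of sorted (A's arr over l)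
theorem fold_invariant (l : List Int) :
    (l.foldl (fun top num =>
      if PySem.Int.mod num 2 ≠ 0 && is_prime num then top
      else
        let u := insSorted (num * 2) top
        if u.length > 3 then u.drop 1 else u) [])
    = trim3 (PySem.List.sorted
        (l.foldl (fun arr num =>
          if PySem.Int.mod num 2 ≠ 0 && is_prime num then arr
          else arr ++ [num * 2]) []) (fun y => y) false) := by
  induction l using List.reverseRecOn with
  | nil => rfl
  | append_singleton l x ih =>
    rw [List.foldl_append, List.foldl_append]
    simp only [List.foldl_cons, List.foldl_nil]
    split
    · exact ih
    · rw [ih, sorted_append_singleton]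
      rw [trim3_eq_step _ (by rw [length_insSorted]; have := length_trim3_le (PySem.List.sorted (l.foldl (fun arr num => if PySem.Int.mod num 2 ≠ 0 && is_prime num then arr else arr ++ [num * 2]) []) (fun y => y) false); omega)]
      exact (trim3_insSorted (x * 2) _ (PySem.List.sorted_pairwise _ _)).symm

-- ===== VERDICT (by name: the statement is the Claim_ definition above) =====
theorem f_spec : Claim_equal_f := by
  intro nums _
  show f nums = f_alt nums
  unfold f f_alt
  rw [PySem.List.slice_from_neg_ofNat _ 3 (by omega)]
  exact (fold_invariant nums).symm
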